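-- pv_equiv track=rewrite | github.com/arkanemystic/janestreetpuzzles | hooks11-improved.py | create_hook_map
-- ===== SOURCE A (Python) =====
-- def create_hook_map(size):
--     hook_map = [[0] * size for _ in range(size)]
--     for i in range(size // 2 + 1):
--         hook_id = size - 2 * i
--         if hook_id < 1: continue
--         for j in range(i, size - i):
--             hook_map[i][j], hook_map[j][i] = hook_id, hook_id
--     return hook_map
-- ===== SOURCE B (Python) =====
-- def create_hook_map(size):
--     # closed form: cell (r, c) holds its hook id size - 2*min(r, c) on the
--     # upper-left triangle (r + c < size) and 0 on the rest of the grid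
--     return [[size - 2 * min(r, c) if r + c < size else 0 for c in range(size)]
--             for r in range(size)]
-- ===== Notes on version B (the rewrite author's own statement) =====
-- stated objective: simpler
-- what changed: Replaces the in-place hook-by-hook fill (outer loop over hooks, inner loop writing both arms via transposed index writes) with a single closed-form comprehension computing each cell directly from its row and column indices (hook id on the upper-left triangle, zero elsewhere).
import Mathlib
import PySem

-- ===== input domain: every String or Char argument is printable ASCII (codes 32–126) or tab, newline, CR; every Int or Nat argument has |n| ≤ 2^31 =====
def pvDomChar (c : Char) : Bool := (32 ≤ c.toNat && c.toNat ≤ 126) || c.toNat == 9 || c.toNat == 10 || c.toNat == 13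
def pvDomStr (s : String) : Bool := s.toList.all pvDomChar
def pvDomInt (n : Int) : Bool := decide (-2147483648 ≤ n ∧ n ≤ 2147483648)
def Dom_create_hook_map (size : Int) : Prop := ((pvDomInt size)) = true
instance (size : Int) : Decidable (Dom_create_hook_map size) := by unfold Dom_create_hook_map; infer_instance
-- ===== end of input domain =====

-- B computes every cell by a closed form instead of A's in-place hook-by-hook fill: simpler, same cost.

-- ===== PORT A =====
-- hook_map[r][c] = v (r and c are nonnegative and in range at every call site, so .toNat at the call sites is exact)
def pvSetCell (m : List (List Int)) (r c : Nat) (v : Int) : List (List Int) :=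
  m.set r ((m.getD r []).set c v)

def create_hook_map (size : Int) : List (List Int) :=
  -- hook_map = [[0] * size for _ in range(size)]  ([0]*size = [] for size ≤ 0, as toNat clamps)
  let init := List.replicate size.toNat (List.replicate size.toNat (0 : Int))
  (PySem.List.pyRange 0 (PySem.Int.floordiv size 2 + 1) 1).foldl (fun m i =>
    let hook_id := size - 2 * i
    if hook_id < 1 then m
    else (PySem.List.pyRange i (size - i) 1).foldl (fun m j =>
      pvSetCell (pvSetCell m i.toNat j.toNat hook_id) j.toNat i.toNat hook_id) m) init

-- ===== PORT B =====
def create_hook_map_alt (size : Int) : List (List Int) :=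
  (PySem.List.pyRange 0 size 1).map (fun r =>
    (PySem.List.pyRange 0 size 1).map (fun c =>
      if r + c < size then size - 2 * min r c else 0))

-- ===== PRECONDITION & SPEC =====
def Spec_create_hook_map (size : Int) (out : List (List Int)) : Prop := out = create_hook_map_alt size
instance (size : Int) (out : List (List Int)) : Decidable (Spec_create_hook_map size out) := by unfold Spec_create_hook_map; infer_instance

-- ===== CLAIM (what is proved, stated in full; the proofs are below) =====
def Claim_equal_create_hook_map : Prop := ∀ (size : Int), Dom_create_hook_map size → Spec_create_hook_map size (create_hook_map size)

-- ===== LEMMAS AND PROOFS =====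

-- matrix shape invariant: n rows, each of length n
def pvShape (n : Nat) (m : List (List Int)) : Prop :=
  m.length = n ∧ ∀ row ∈ m, row.length = n

-- cell read used by the characterisation
def pvGet (m : List (List Int)) (r c : Nat) : Int := (m.getD r []).getD c 0

lemma pvRowLen {n : Nat} {m : List (List Int)} (h : pvShape n m) {r : Nat} (hr : r < n) :
    (m.getD r []).length = n := by
  rw [List.getD_eq_getElem m [] (by rw [h.1]; exact hr)]
  exact h.2 _ (List.getElem_mem _)

lemma pvShape_setCell {n : Nat} {m : List (List Int)} (h : pvShape n m)
    {r : Nat} (hr : r < n) (c : Nat) (v : Int) : pvShape n (pvSetCell m r c v) := by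
  refine ⟨by simp [pvSetCell, h.1], ?_⟩
  intro row hrow
  simp only [pvSetCell] at hrow
  rcases List.mem_or_eq_of_mem_set hrow with hmem | heq
  · exact h.2 _ hmem
  · subst heq; rw [List.length_set]; exact pvRowLen h hr

lemma pvGet_setCell {n : Nat} {m : List (List Int)} (h : pvShape n m)
    {r c : Nat} (hr : r < n) (hc : c < n) (v : Int) (r' c' : Nat) :
    pvGet (pvSetCell m r c v) r' c' = if r' = r ∧ c' = c then v else pvGet m r' c' := by
  have hlm : r < m.length := by rw [h.1]; exact hr
  have hrowlen : (m.getD r []).length = n := pvRowLen h hr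
  by_cases hrr : r' = r
  · subst hrr
    rw [pvGet, pvSetCell, List.getD_eq_getElem _ [] (by simpa using hlm),
        List.getElem_set_self (by simpa using hlm)]
    by_cases hcc : c' = c
    · subst hcc
      rw [List.getD_eq_getElem _ 0 (by simp only [List.length_set]; omega),
          List.getElem_set_self (by simp only [List.length_set]; omega)]
      simp
    · by_cases hc' : c' < n
      · rw [List.getD_eq_getElem _ 0 (by simp only [List.length_set]; omega),
            List.getElem_set_ne (fun he => hcc he.symm) _,
            ← List.getD_eq_getElem _ 0 (by omega)]
        simp [pvGet, hcc]
      · rw [List.getD_eq_default _ 0 (by simp only [List.length_set]; omega)]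
        rw [pvGet, List.getD_eq_default _ 0 (by omega)]
        simp [hcc]
  · have hl1 : m.length = n := h.1
    rw [pvGet, pvSetCell]
    by_cases hr' : r' < n
    · rw [List.getD_eq_getElem _ [] (by simp only [List.length_set]; omega),
          List.getElem_set_ne (fun he => hrr he.symm) _,
          ← List.getD_eq_getElem _ [] (by omega)]
      simp [pvGet, hrr]
    · rw [List.getD_eq_default _ [] (by simp only [List.length_set]; omega)]
      rw [pvGet, List.getD_eq_default _ [] (by omega)]
      simp [hrr]

-- inner loop of A: writing both arms of hook i over an arbitrary list of column indices
set_option maxHeartbeats 1600000 in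
lemma pvInner (n : Nat) (i : Nat) (hi : i < n) (v : Int) :
    ∀ (js : List Int) (m : List (List Int)), pvShape n m →
    (∀ j ∈ js, 0 ≤ j ∧ j < (n : Int)) →
    pvShape n (js.foldl (fun m j => pvSetCell (pvSetCell m i j.toNat v) j.toNat i v) m) ∧
    ∀ r c : Nat,
      pvGet (js.foldl (fun m j => pvSetCell (pvSetCell m i j.toNat v) j.toNat i v) m) r c
        = if (r = i ∧ (c : Int) ∈ js) ∨ (c = i ∧ (r : Int) ∈ js) then v else pvGet m r c := by
  intro js
  induction js with
  | nil => intro m hm _; exact ⟨hm, fun r c => by simp⟩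
  | cons j tl ih =>
    intro m hm hjs
    have hj := hjs j (by simp)
    have hjn : j.toNat < n := by omega
    have hm1 : pvShape n (pvSetCell m i j.toNat v) := pvShape_setCell hm hi j.toNat v
    have hm2 : pvShape n (pvSetCell (pvSetCell m i j.toNat v) j.toNat i v) :=
      pvShape_setCell hm1 hjn i v
    have htl := ih _ hm2 (fun x hx => hjs x (by simp [hx]))
    refine ⟨by simpa using htl.1, ?_⟩
    intro r c
    have hcj : ((c : Int) = j) ↔ c = j.toNat := by omega
    have hrj : ((r : Int) = j) ↔ r = j.toNat := by omega
    have h2 := htl.2 r c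
    simp only [List.foldl_cons] at h2 ⊢
    rw [h2, pvGet_setCell hm1 hjn hi v r c, pvGet_setCell hm hi hjn v r c]
    simp only [List.mem_cons, hcj, hrj]
    split_ifs <;> tauto

-- outer loop of A over an arbitrary list of hook indices
lemma pvOuter (size : Int) (n : Nat) (hn : size ≤ (n : Int)) :
    ∀ (is : List Int) (m : List (List Int)), pvShape n m →
    (∀ i ∈ is, 0 ≤ i) →
    pvShape n (is.foldl (fun m i =>
        if size - 2 * i < 1 then m
        else (PySem.List.pyRange i (size - i) 1).foldl (fun m j =>
          pvSetCell (pvSetCell m i.toNat j.toNat (size - 2 * i)) j.toNat i.toNat (size - 2 * i)) m) m) ∧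
    ∀ r c : Nat,
      pvGet (is.foldl (fun m i =>
        if size - 2 * i < 1 then m
        else (PySem.List.pyRange i (size - i) 1).foldl (fun m j =>
          pvSetCell (pvSetCell m i.toNat j.toNat (size - 2 * i)) j.toNat i.toNat (size - 2 * i)) m) m) r c
        = if ((min r c : Int) ∈ is ∧ 1 ≤ size - 2 * (min r c : Int) ∧ (r : Int) + (c : Int) < size)
          then size - 2 * (min r c : Int) else pvGet m r c := by
  intro is
  induction is with
  | nil => intro m hm _; exact ⟨hm, fun r c => by simp⟩
  | cons i tl ih =>
    intro m hm his
    have hi0 : 0 ≤ i := his i (by simp)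
    by_cases hskip : size - 2 * i < 1
    · have hrest := ih m hm (fun x hx => his x (by simp [hx]))
      refine ⟨by simpa [hskip] using hrest.1, ?_⟩
      intro r c
      have h2 := hrest.2 r c
      simp only [List.foldl_cons, if_pos hskip]
      rw [h2]
      simp only [List.mem_cons]
      have hno : ¬ (min (r : Int) (c : Int) = i ∧ 1 ≤ size - 2 * min (r : Int) (c : Int)) := by omega
      split_ifs <;> tauto
    · rw [not_lt] at hskip
      have hin : i.toNat < n := by omega
      have hinner := pvInner n i.toNat hin (size - 2 * i)
        (PySem.List.pyRange i (size - i) 1) m hm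
        (fun j hj => by
          rw [PySem.List.mem_pyRange_one] at hj
          constructor <;> omega)
      have htl := ih _ hinner.1 (fun x hx => his x (by simp [hx]))
      simp only [List.foldl_cons, if_neg (by omega : ¬ size - 2 * i < 1)]
      refine ⟨htl.1, ?_⟩
      intro r c
      rw [htl.2 r c, hinner.2 r c]
      simp only [PySem.List.mem_pyRange_one, List.mem_cons]
      have hmin : ((r = i.toNat ∧ i ≤ (c : Int) ∧ (c : Int) < size - i) ∨
          (c = i.toNat ∧ i ≤ (r : Int) ∧ (r : Int) < size - i)) ↔
          (min (r : Int) (c : Int) = i ∧ (r : Int) + (c : Int) < size) := by omega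
      rw [if_congr hmin rfl rfl]
      by_cases hmem : min (r : Int) (c : Int) ∈ tl ∧ 1 ≤ size - 2 * min (r : Int) (c : Int) ∧ (r : Int) + (c : Int) < size
      · rw [if_pos hmem, if_pos (show ((min (r:Int) (c:Int) = i ∨ min (r:Int) (c:Int) ∈ tl) ∧ _) from ⟨Or.inr hmem.1, hmem.2⟩)]
      · rw [if_neg hmem]
        by_cases hcase : min (r : Int) (c : Int) = i ∧ (r : Int) + (c : Int) < size
        · rw [if_pos hcase, if_pos (show ((min (r:Int) (c:Int) = i ∨ min (r:Int) (c:Int) ∈ tl) ∧ _) from ⟨Or.inl hcase.1, by omega, hcase.2⟩), hcase.1]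
        · rw [if_neg hcase, if_neg (by tauto)]

lemma pvShape_init (n : Nat) :
    pvShape n (List.replicate n (List.replicate n (0 : Int))) :=
  ⟨by simp, fun row hrow => by rw [List.eq_of_mem_replicate hrow]; simp⟩

lemma pvGet_init (n : Nat) (r c : Nat) :
    pvGet (List.replicate n (List.replicate n (0 : Int))) r c = 0 := by
  unfold pvGet
  by_cases hr : r < n
  · rw [List.getD_eq_getElem _ [] (by simpa using hr), List.getElem_replicate]
    by_cases hc : c < n
    · rw [List.getD_eq_getElem _ 0 (by simpa using hc), List.getElem_replicate]
    · rw [List.getD_eq_default _ 0 (by simpa using Nat.le_of_not_lt hc)]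
  · rw [List.getD_eq_default _ [] (by simpa using Nat.le_of_not_lt hr)]
    simp

-- ===== VERDICT (by name: the statement is the Claim_ definition above) =====
theorem create_hook_map_spec : Claim_equal_create_hook_map := by
  intro size _
  unfold Spec_create_hook_map create_hook_map create_hook_map_alt
  set n := size.toNat with hndef
  have hn : size ≤ (n : Int) := by omega
  have hmain := pvOuter size n hn
    (PySem.List.pyRange 0 (PySem.Int.floordiv size 2 + 1) 1)
    (List.replicate n (List.replicate n (0 : Int))) (pvShape_init n)
    (fun i hi => (PySem.List.mem_pyRange_one.1 hi).1)
  obtain ⟨hshape, hcells⟩ := hmain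
  apply List.ext_getElem
  · rw [hshape.1, List.length_map, PySem.List.length_pyRange_one]
    omega
  · intro r h1 h2
    have hrn : r < n := by rwa [hshape.1] at h1
    apply List.ext_getElem
    · have := pvRowLen hshape hrn
      rw [List.getD_eq_getElem _ [] h1] at this
      rw [this, List.getElem_map, List.length_map, PySem.List.length_pyRange_one]
      omega
    · intro c hc1 hc2
      have hcn : c < n := by
        have := pvRowLen hshape hrn
        rw [List.getD_eq_getElem _ [] h1] at this
        omega
      have hcell := hcells r c
      rw [pvGet, List.getD_eq_getElem _ [] h1,
          List.getD_eq_getElem _ 0 hc1, pvGet_init] at hcell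
      rw [hcell]
      simp only [List.getElem_map, PySem.List.getElem_pyRange_one, zero_add]
      have hmem : (min (r : Int) (c : Int) ∈ PySem.List.pyRange 0 (PySem.Int.floordiv size 2 + 1) 1)
          ↔ (0 ≤ min (r : Int) (c : Int) ∧ min (r : Int) (c : Int) < PySem.Int.floordiv size 2 + 1) :=
        PySem.List.mem_pyRange_one
      have hdiv : (min (r : Int) (c : Int) ≤ PySem.Int.floordiv size 2) ↔ (min (r : Int) (c : Int) * 2 ≤ size) :=
        PySem.Int.le_floordiv_iff_mul_le (by omega)
      by_cases hlt : (r : Int) + (c : Int) < size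
      · rw [if_pos (by rw [hmem]; omega), if_pos hlt]
      · rw [if_neg (fun hh => hlt hh.2.2), if_neg hlt]
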